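-- pv_equiv track=rewrite | github.com/fies09/mp | dispatch_v5.3.2/task/robot_path/tools/Dijkstra.py | cal_dis
-- ===== SOURCE A (Python) =====
-- def cal_dis(graph, paths):
--     dis_list = []
--     for i in paths:
--         dis = 0
--         for j in range(0, len(i) - 1):
--             dis += graph[i[j]][i[j + 1]]
--         dis_list.append(dis)
--     index = [i for i, x in enumerate(dis_list) if x == min(dis_list)]
--     roads = paths[index[0]]
--     for i in range(0, len(index)):
--         if len(paths[index[i]]) < len(roads):
--             roads = paths[index[i]]
--     return min(dis_list), roads
-- ===== SOURCE B (Python) =====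
-- def cal_dis(graph, paths):
--     # single pass: keep (best distance, best road); no distance list, no index pass
--     best = None
--     for path in paths:
--         dis = sum(graph[a][b] for a, b in zip(path, path[1:]))
--         if best is None or dis < best[0]:
--             best = (dis, path)
--         elif dis == best[0] and len(path) < len(best[1]):
--             best = (dis, path)
--     if best is None:
--         raise ValueError("min() arg is an empty sequence")
--     return best
-- ===== Notes on version B (the rewrite author's own statement) =====
-- stated objective: simpler
-- what changed: Replaces A's four passes (build dis_list, re-scan with min recomputed per element to collect all min indices, then a length-minimising loop over those indices) by one online pass that keeps (best_dis, best_road) and updates on strictly smaller distance or equal distance with strictly shorter path.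
import Mathlib
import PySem

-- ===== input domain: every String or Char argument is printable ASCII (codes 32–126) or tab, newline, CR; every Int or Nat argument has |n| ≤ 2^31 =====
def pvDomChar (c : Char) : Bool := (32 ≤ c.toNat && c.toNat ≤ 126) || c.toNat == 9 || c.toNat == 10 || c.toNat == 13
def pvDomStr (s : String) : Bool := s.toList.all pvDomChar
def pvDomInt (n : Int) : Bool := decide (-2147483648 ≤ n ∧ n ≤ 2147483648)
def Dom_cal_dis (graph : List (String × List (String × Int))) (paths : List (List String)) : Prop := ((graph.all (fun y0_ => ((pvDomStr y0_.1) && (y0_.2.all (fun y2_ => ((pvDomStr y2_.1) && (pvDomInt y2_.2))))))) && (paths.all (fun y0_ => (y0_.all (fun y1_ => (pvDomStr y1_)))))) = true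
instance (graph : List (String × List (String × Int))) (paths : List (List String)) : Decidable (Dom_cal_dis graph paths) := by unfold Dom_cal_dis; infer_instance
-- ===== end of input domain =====

-- B replaces A's multi-pass min/argmin scans by one online pass keeping (best_dis, best_road); simpler, same results.

-- ===== PORT A =====
def cal_dis (graph : List (String × List (String × Int))) (paths : List (List String)) : Int × List String :=
  let dis_list : List Int := paths.foldl (fun acc i =>
    acc ++ [(PySem.List.pyRange 0 ((i.length : Int) - 1) 1).foldl
      (fun dis j => dis +
        ((((List.lookup (PySem.List.pyGetD i j "") graph).getD []).lookup
            (PySem.List.pyGetD i (j + 1) "")).getD 0)) 0]) []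
  -- Python raises on empty paths (index[0] / min([])); Pre_ excludes that, .getD totalizes
  let m := (PySem.List.min? dis_list (fun x => x)).getD 0
  let index : List Int := (PySem.List.enumerate dis_list 0).foldl
    (fun acc ix => if ix.2 = m then acc ++ [ix.1] else acc) []
  let roads0 := PySem.List.pyGetD paths (PySem.List.pyGetD index 0 0) []
  let roads := (PySem.List.pyRange 0 ((index.length : Int)) 1).foldl
    (fun roads i =>
      if (PySem.List.pyGetD paths (PySem.List.pyGetD index i 0) []).length < roads.length
      then PySem.List.pyGetD paths (PySem.List.pyGetD index i 0) []
      else roads) roads0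
  (m, roads)

-- ===== PORT B =====
def cal_dis_alt (graph : List (String × List (String × Int))) (paths : List (List String)) : Int × List String :=
  let best : Option (Int × List String) := paths.foldl (fun best path =>
    let dis := (path.zip path.tail).foldl
      (fun s ab => s + (((List.lookup ab.1 graph).getD []).lookup ab.2).getD 0) 0
    match best with
    | none => some (dis, path)
    | some (bd, br) =>
      if dis < bd then some (dis, path)
      else if dis = bd ∧ path.length < br.length then some (dis, path)
      else some (bd, br)) none
  -- Python raises ValueError when best is None (empty paths); Pre_ excludes that, .getD totalizes
  best.getD (0, [])

-- ===== PRECONDITION & SPEC =====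
-- Pre_ excludes exactly the inputs where Python A raises: empty `paths` (IndexError on index[0])
-- and paths with a consecutive node pair missing from the nested graph dicts (KeyError).
def Pre_cal_dis (graph : List (String × List (String × Int))) (paths : List (List String)) : Prop :=
  paths ≠ [] ∧ ∀ p ∈ paths, ∀ ab ∈ p.zip p.tail,
    ((List.lookup ab.1 graph).bind (fun row => List.lookup ab.2 row)).isSome = true
instance (graph : List (String × List (String × Int))) (paths : List (List String)) : Decidable (Pre_cal_dis graph paths) := by unfold Pre_cal_dis; infer_instance

def pvWitness_cal_dis : (List (String × List (String × Int))) × List (List String) :=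
  ([("a", [("b", 2), ("c", 5)]), ("b", [("c", 1)])], [["a", "b", "c"], ["a", "c"]])

def Spec_cal_dis (graph : List (String × List (String × Int))) (paths : List (List String)) (out : Int × List String) : Prop := out = cal_dis_alt graph paths
instance (graph : List (String × List (String × Int))) (paths : List (List String)) (out : Int × List String) : Decidable (Spec_cal_dis graph paths out) := by unfold Spec_cal_dis; infer_instance

-- ===== CLAIM (what is proved, stated in full; the proofs are below) =====
def Claim_equal_cal_dis : Prop := ∀ (graph : List (String × List (String × Int))) (paths : List (List String)), Dom_cal_dis graph paths → Pre_cal_dis graph paths → Spec_cal_dis graph paths (cal_dis graph paths)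

-- ===== LEMMAS AND PROOFS =====

-- B's per-path distance (the zip fold), as a named function for the proofs
def pvD (graph : List (String × List (String × Int))) (p : List String) : Int :=
  (p.zip p.tail).foldl
    (fun s ab => s + (((List.lookup ab.1 graph).getD []).lookup ab.2).getD 0) 0

def pvShort (r p : List String) : List String := if p.length < r.length then p else r

def pvStep (graph : List (String × List (String × Int))) (s : Int × List String) (p : List String) : Int × List String :=
  if pvD graph p < s.1 then (pvD graph p, p)
  else if pvD graph p = s.1 ∧ p.length < s.2.length then (s.1, p) else s

def pvRFold (F : List (List String)) : List String := F.foldl pvShort (F.getD 0 [])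

-- zip with tail as an indexed range
lemma pv_zip_tail_eq {α : Type} (p : List α) (d : α) :
    p.zip p.tail = (List.range (p.length - 1)).map (fun k => (p.getD k d, p.getD (k+1) d)) := by
  induction p with
  | nil => simp
  | cons a q ih =>
    cases q with
    | nil => simp
    | cons b t =>
      have ih' := ih
      simp only [List.tail_cons] at ih' ⊢
      show (a, b) :: (b :: t).zip t = _
      rw [show (a :: b :: t).length - 1 = ((b :: t).length - 1) + 1 by simp]
      rw [List.range_succ_eq_map, List.map_cons, List.map_map]
      simp only [List.getD_cons_zero, List.getD_cons_succ]
      exact congrArg _ ih'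

-- A's inner range-fold distance equals B's zip-fold distance
lemma pv_dist_eq (e : String → String → Int) (p : List String) :
    (PySem.List.pyRange 0 ((p.length : Int) - 1) 1).foldl
      (fun dis j => dis + e (PySem.List.pyGetD p j "") (PySem.List.pyGetD p (j + 1) "")) 0
    = (p.zip p.tail).foldl (fun s ab => s + e ab.1 ab.2) 0 := by
  rw [PySem.List.pyRange_one, List.foldl_map, pv_zip_tail_eq p "", List.foldl_map]
  rw [show (((p.length : Int) - 1) - 0).toNat = p.length - 1 by omega]
  congr 1
  funext dis k
  have h1 : (0 : Int) + (k : Int) = ((k : Nat) : Int) := by omega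
  rw [h1]
  rw [show ((k : Nat) : Int) + 1 = (((k + 1 : Nat)) : Int) by push_cast; ring]
  rw [PySem.List.pyGetD_natCast, PySem.List.pyGetD_natCast]

-- the min-index list, mapped back through paths, is the filter of the min-distance paths
lemma pv_idx_map (dFn : List String → Int) (m : Int) (paths : List (List String)) :
    ∀ (rest : List (List String)) (s : Nat), paths.drop s = rest →
    (((PySem.List.enumerate (rest.map dFn) (s : Int)).filter
        (fun ix => decide (ix.2 = m))).map (·.1)).map
      (fun ix => PySem.List.pyGetD paths ix []) =
    rest.filter (fun p => decide (dFn p = m)) := by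
  intro rest
  induction rest with
  | nil => intro s _; simp [PySem.List.enumerate_nil]
  | cons x rest' ih =>
    intro s hdrop
    have hx : PySem.List.pyGetD paths (s : Int) [] = x := by
      rw [PySem.List.pyGetD_natCast]
      have h1 : paths[s]? = some x := by
        rw [← List.head?_drop, hdrop]; rfl
      rw [List.getD_eq_getElem?_getD, h1]; rfl
    have hdrop' : paths.drop (s + 1) = rest' := by
      rw [← List.tail_drop, hdrop]; rfl
    have hcast : (s : Int) + 1 = ((s + 1 : Nat) : Int) := by push_cast; ring
    simp only [List.map_cons, PySem.List.enumerate_cons, List.filter_cons, hcast]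
    by_cases hm : dFn x = m
    · simp only [hm, decide_true, if_true, List.map_cons, hx]
      rw [List.cons.injEq]
      refine ⟨rfl, ?_⟩
      exact ih (s + 1) hdrop'
    · simp only [hm, decide_false, Bool.false_eq_true, if_false]
      exact ih (s + 1) hdrop'


lemma pv_rfold_append (F : List (List String)) (p : List String) (h : F ≠ []) :
    pvRFold (F ++ [p]) = pvShort (pvRFold F) p := by
  cases F with
  | nil => exact absurd rfl h
  | cons f0 fs => simp [pvRFold, List.foldl_append]

-- B's option fold is the plain pair fold once seeded
lemma pv_step_opt (graph : List (String × List (String × Int))) :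
    ∀ (qs : List (List String)) (s : Int × List String),
    qs.foldl (fun best path =>
      let dis := (path.zip path.tail).foldl
        (fun s ab => s + (((List.lookup ab.1 graph).getD []).lookup ab.2).getD 0) 0
      match best with
      | none => some (dis, path)
      | some (bd, br) =>
        if dis < bd then some (dis, path)
        else if dis = bd ∧ path.length < br.length then some (dis, path)
        else some (bd, br)) (some s)
    = some (qs.foldl (pvStep graph) s) := by
  intro qs
  induction qs with
  | nil => intro s; rfl
  | cons p qs ih =>
    intro s
    obtain ⟨bd, br⟩ := s
    rw [List.foldl_cons, List.foldl_cons]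
    rw [← ih (pvStep graph (bd, br) p)]
    congr 1
    refine Eq.trans (b := (if pvD graph p < bd then some (pvD graph p, p)
        else if pvD graph p = bd ∧ p.length < br.length then some (pvD graph p, p)
        else some (bd, br))) rfl ?_
    simp only [pvStep]
    split_ifs with h1 h2
    · rfl
    · simp only [h2.1]
    · rfl

-- the index-collecting loop as filter+map
lemma pv_fold_idx (m : Int) (l : List (Int × Int)) (acc : List Int) :
    l.foldl (fun acc ix => if ix.2 = m then acc ++ [ix.1] else acc) acc
      = acc ++ (l.filter (fun ix => decide (ix.2 = m))).map (·.1) := by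
  induction l generalizing acc with
  | nil => simp
  | cons x t ih =>
    rw [List.foldl_cons, List.filter_cons]
    by_cases h : x.2 = m
    · simp [h, ih]
    · simp [h, ih]

-- the roads loop over range(len(index)) as a fold over the mapped index list
lemma pv_fold_range (paths2 : List (List String)) (idx : List Int) (init : List String) :
    (PySem.List.pyRange 0 ((idx.length : Int)) 1).foldl
      (fun roads i =>
        if (PySem.List.pyGetD paths2 (PySem.List.pyGetD idx i 0) []).length < roads.length
        then PySem.List.pyGetD paths2 (PySem.List.pyGetD idx i 0) []
        else roads) init
      = (idx.map (fun ix => PySem.List.pyGetD paths2 ix [])).foldl pvShort init := by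
  rw [PySem.List.foldl_pyRange_zero_pyGetD' idx 0
    (fun acc x => if (PySem.List.pyGetD paths2 x []).length < acc.length
      then PySem.List.pyGetD paths2 x [] else acc) init]
  rw [List.foldl_map]
  rfl

-- the main characterisation: A's (min, filtered length-fold) equals B's online fold
lemma pv_main (graph : List (String × List (String × Int))) (qs : List (List String)) (q : List String) :
    ((qs.map (pvD graph)).foldl min (pvD graph q),
      pvRFold ((q :: qs).filter
        (fun p => decide (pvD graph p = (qs.map (pvD graph)).foldl min (pvD graph q)))))
    = qs.foldl (pvStep graph) (pvD graph q, q) := by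
  induction qs using List.reverseRecOn with
  | nil => simp [pvRFold, pvShort]
  | append_singleton qs p ih =>
    have hM := PySem.List.foldl_min_le (qs.map (pvD graph)) (pvD graph q)
    set M := (qs.map (pvD graph)).foldl min (pvD graph q) with hMdef
    have hle : ∀ x ∈ q :: qs, M ≤ pvD graph x := by
      intro x hx
      rcases List.mem_cons.1 hx with h | h
      · subst h; exact hM.1
      · exact hM.2 _ (List.mem_map_of_mem h)
    have hmem : ∃ x ∈ q :: qs, pvD graph x = M := by
      rcases PySem.List.foldl_min_mem (qs.map (pvD graph)) (pvD graph q) with h | h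
      · exact ⟨q, List.mem_cons_self, h.symm⟩
      · rcases List.mem_map.1 h with ⟨x, hx, hxe⟩
        exact ⟨x, List.mem_cons_of_mem _ hx, hxe⟩
    have hFne : (q :: qs).filter (fun p => decide (pvD graph p = M)) ≠ [] := by
      rcases hmem with ⟨x, hx1, hx2⟩
      intro hcon
      have := List.filter_eq_nil_iff.1 hcon x hx1
      simp [hx2] at this
    rw [List.map_append, List.foldl_append, List.foldl_append]
    rw [← ih, ← hMdef]
    simp only [List.foldl_cons, List.foldl_nil]
    have hpredP : ∀ (v : Int), List.foldl min M (List.map (pvD graph) [p]) = v →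
        ((fun x : List String => decide (pvD graph x = List.foldl min M (List.map (pvD graph) [p])))
          = fun x : List String => decide (pvD graph x = v)) := by
      intro v hv; funext x; rw [hv]
    rcases lt_trichotomy (pvD graph p) M with hlt | heq | hgt
    · have hmin : List.foldl min M (List.map (pvD graph) [p]) = pvD graph p := by
        simp [min_eq_right hlt.le]
      rw [hpredP _ hmin, hmin]
      have hfilter : (q :: (qs ++ [p])).filter
          (fun x : List String => decide (pvD graph x = pvD graph p)) = [p] := by
        rw [show q :: (qs ++ [p]) = (q :: qs) ++ [p] from rfl, List.filter_append]
        have h1 : (q :: qs).filter (fun x : List String => decide (pvD graph x = pvD graph p)) = [] := by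
          apply List.filter_eq_nil_iff.2
          intro x hx
          have := hle x hx
          simp only [decide_eq_true_eq]
          omega
        rw [h1, List.nil_append, List.filter_singleton]
        rw [show (decide (pvD graph p = pvD graph p)) = true from by simp]
        simp only [Bool.cond_true]
      rw [hfilter]
      have hstep : pvStep graph
          (M, pvRFold ((q :: qs).filter fun p => decide (pvD graph p = M))) p = (pvD graph p, p) := by
        simp only [pvStep]
        rw [if_pos hlt]
      rw [hstep]
      simp [pvRFold, pvShort]
    · have hmin : List.foldl min M (List.map (pvD graph) [p]) = M := by
        simp [heq]
      rw [hpredP _ hmin, hmin]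
      have hfilter : (q :: (qs ++ [p])).filter
          (fun x : List String => decide (pvD graph x = M)) =
          ((q :: qs).filter fun x : List String => decide (pvD graph x = M)) ++ [p] := by
        rw [show q :: (qs ++ [p]) = (q :: qs) ++ [p] from rfl, List.filter_append, List.filter_singleton]
        rw [show (decide (pvD graph p = M)) = true from by
          simp only [decide_eq_true_eq]; omega]
        simp only [Bool.cond_true]
      rw [hfilter, pv_rfold_append _ _ hFne]
      simp only [pvStep, pvShort, heq, lt_self_iff_false, if_false, true_and]
      by_cases hlen : p.length <
          (pvRFold ((q :: qs).filter fun p => decide (pvD graph p = M))).length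
      · rw [if_pos hlen, if_pos hlen]
      · rw [if_neg hlen, if_neg hlen]
    · have hmin : List.foldl min M (List.map (pvD graph) [p]) = M := by
        simp [min_eq_left hgt.le]
      rw [hpredP _ hmin, hmin]
      have hfilter : (q :: (qs ++ [p])).filter
          (fun x : List String => decide (pvD graph x = M)) =
          (q :: qs).filter fun x : List String => decide (pvD graph x = M) := by
        rw [show q :: (qs ++ [p]) = (q :: qs) ++ [p] from rfl, List.filter_append, List.filter_singleton]
        rw [show (decide (pvD graph p = M)) = false from by
          simp only [decide_eq_false_iff_not]; omega]
        simp only [Bool.cond_false, List.append_nil]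
      rw [hfilter]
      simp only [pvStep]
      rw [if_neg (by omega), if_neg (by rintro ⟨h1, -⟩; omega)]

-- ===== VERDICT (by name: the statement is the Claim_ definition above) =====
theorem cal_dis_spec : Claim_equal_cal_dis := by
  intro graph paths _ hpre
  obtain ⟨hne, -⟩ := hpre
  unfold Spec_cal_dis
  cases paths with
  | nil => exact absurd rfl hne
  | cons q qs =>
    -- rewrite A's dis_list into map pvD
    have hdis : (q :: qs).foldl (fun acc i =>
        acc ++ [(PySem.List.pyRange 0 ((i.length : Int) - 1) 1).foldl
          (fun dis j => dis +
            ((((List.lookup (PySem.List.pyGetD i j "") graph).getD []).lookup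
                (PySem.List.pyGetD i (j + 1) "")).getD 0)) 0]) []
        = (q :: qs).map (pvD graph) := by
      rw [PySem.List.foldl_append_singleton_eq_map, List.nil_append]
      apply List.map_congr_left
      intro x _
      exact pv_dist_eq (fun a b => (((List.lookup a graph).getD []).lookup b).getD 0) x
    simp only [cal_dis, hdis]
    have hgetd : (PySem.List.min? ((q :: qs).map (pvD graph)) (fun x => x)).getD 0
        = (qs.map (pvD graph)).foldl min (pvD graph q) := by
      rw [List.map_cons, PySem.List.min?_id_cons]
      rfl
    rw [hgetd]
    -- index list fold = filter+map over enumerate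
    simp only [pv_fold_idx, List.nil_append]
    -- roads loop over pyRange = fold over the index list mapped through paths
    rw [pv_fold_range]
    have hidx := pv_idx_map (pvD graph) ((qs.map (pvD graph)).foldl min (pvD graph q))
      (q :: qs) (q :: qs) 0 rfl
    simp only [Nat.cast_zero] at hidx
    -- the filtered list is nonempty (the min is attained)
    have hmem : ∃ x ∈ q :: qs, pvD graph x = (qs.map (pvD graph)).foldl min (pvD graph q) := by
      rcases PySem.List.foldl_min_mem (qs.map (pvD graph)) (pvD graph q) with h | h
      · exact ⟨q, List.mem_cons_self, h.symm⟩
      · rcases List.mem_map.1 h with ⟨x, hx, hxe⟩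
        exact ⟨x, List.mem_cons_of_mem _ hx, hxe⟩
    have hFne : (q :: qs).filter
        (fun p => decide (pvD graph p = (qs.map (pvD graph)).foldl min (pvD graph q))) ≠ [] := by
      rcases hmem with ⟨x, hx1, hx2⟩
      intro hcon
      have := List.filter_eq_nil_iff.1 hcon x hx1
      simp [hx2] at this
    -- identify the seed with F.getD 0 []
    have hseed : PySem.List.pyGetD (q :: qs)
        (PySem.List.pyGetD ((((PySem.List.enumerate ((q :: qs).map (pvD graph)) 0).filter
          (fun ix => decide (ix.2 = (qs.map (pvD graph)).foldl min (pvD graph q)))).map (·.1))) 0 0) []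
        = ((q :: qs).filter
            (fun p => decide (pvD graph p = (qs.map (pvD graph)).foldl min (pvD graph q)))).getD 0 [] := by
      have hidx' := hidx
      cases hL : (((PySem.List.enumerate ((q :: qs).map (pvD graph)) 0).filter
          (fun ix => decide (ix.2 = (qs.map (pvD graph)).foldl min (pvD graph q)))).map (·.1)) with
      | nil =>
        rw [hL] at hidx'
        simp only [List.map_nil] at hidx'
        exact absurd hidx'.symm hFne
      | cons i0 is =>
        rw [hL] at hidx'
        rw [PySem.List.pyGetD_zero]
        simp only [List.getD_cons_zero]
        rw [← hidx']
        simp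
    rw [hidx, hseed]
    -- B's side: seed with the first path, then the online fold
    have h0 : cal_dis_alt graph (q :: qs) = (qs.foldl (fun best path =>
        let dis := (path.zip path.tail).foldl
          (fun s ab => s + (((List.lookup ab.1 graph).getD []).lookup ab.2).getD 0) 0
        match best with
        | none => some (dis, path)
        | some (bd, br) =>
          if dis < bd then some (dis, path)
          else if dis = bd ∧ path.length < br.length then some (dis, path)
          else some (bd, br)) (some (pvD graph q, q))).getD (0, []) := rfl
    rw [h0, pv_step_opt graph qs (pvD graph q, q), Option.getD_some, ← pv_main]
    rfl
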